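-- pv_equiv track=rewrite | github.com/antovk/test-tasks | array-division/array_division.py | solution
-- ===== SOURCE A (Python) =====
-- def solution(arr):
--     max_left = arr[0]
--     max_right = max(arr[1:])
--     max_diff = abs(max_left - max_right)
--
--     for i in range(1, len(arr) - 1):
--         max_left = max(max_left, arr[i])
--
--         if max_right == arr[i]:
--             max_right = max(arr[i + 1:])
--
--         diff = abs(max_left - max_right)
--
--         if diff > max_diff:
--             max_diff = diff
--
--     return max_diff
-- ===== SOURCE B (Python) =====
-- def solution(arr):
--     # suffix maxima built back-to-front, then one forward pass with a running
--     # prefix max: O(n) instead of A's worst-case O(n^2)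
--     m = arr[-1]
--     sufs = [m]
--     for x in reversed(arr[:-1]):
--         m = max(x, m)
--         sufs.append(m)
--     sufs.reverse()          # sufs[i] == max(arr[i:])
--     pref = None
--     best = None
--     for x, s in zip(arr, sufs[1:]):
--         pref = x if pref is None else max(pref, x)
--         d = abs(pref - s)
--         if best is None or d > best:
--             best = d
--     return best
-- ===== Notes on version B (the rewrite author's own statement) =====
-- stated objective: faster
-- what changed: A recomputes max(arr[i+1:]) inside the loop whenever the running right max is consumed (worst case O(n^2), e.g. a decreasing array); B precomputes the suffix-maxima list once back-to-front and then makes a single forward pass with a running prefix max.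
import Mathlib
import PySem

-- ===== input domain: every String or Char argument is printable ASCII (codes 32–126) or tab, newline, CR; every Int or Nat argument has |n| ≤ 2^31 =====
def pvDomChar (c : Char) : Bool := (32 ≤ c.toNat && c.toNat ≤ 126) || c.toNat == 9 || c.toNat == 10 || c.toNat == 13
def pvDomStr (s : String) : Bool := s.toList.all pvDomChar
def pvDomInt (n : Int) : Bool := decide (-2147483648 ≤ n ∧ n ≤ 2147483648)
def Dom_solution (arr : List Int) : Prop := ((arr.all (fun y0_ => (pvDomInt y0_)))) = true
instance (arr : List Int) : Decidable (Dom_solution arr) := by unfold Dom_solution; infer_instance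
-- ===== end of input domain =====

-- B replaces A's repeated in-loop suffix-max recomputation by a precomputed
-- suffix-maxima list plus one forward pass with a running prefix max.

-- ===== PORT A =====
def solution (arr : List Int) : Int :=
  let max_left := (PySem.List.pyGet? arr 0).getD 0
  let max_right := (PySem.List.max? (PySem.List.slice arr (some 1) none) (fun y => y)).getD 0
  let max_diff := |max_left - max_right|
  let st := (PySem.List.pyRange 1 ((arr.length : Int) - 1) 1).foldl
    (fun (st : Int × Int × Int) i =>
      let ml := max st.1 ((PySem.List.pyGet? arr i).getD 0)
      let mr := if st.2.1 = (PySem.List.pyGet? arr i).getD 0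
                then (PySem.List.max? (PySem.List.slice arr (some (i + 1)) none) (fun y => y)).getD 0
                else st.2.1
      let d := |ml - mr|
      (ml, mr, if d > st.2.2 then d else st.2.2))
    (max_left, max_right, max_diff)
  st.2.2

-- ===== PORT B =====
def solution_alt (arr : List Int) : Int :=
  let m0 := (PySem.List.pyGet? arr (-1)).getD 0
  let built := ((PySem.List.slice arr none (some (-1))).reverse).foldl
    (fun (st : Int × List Int) x => (max x st.1, st.2 ++ [max x st.1])) (m0, [m0])
  let sufs := built.2.reverse
  let st2 := (arr.zip (PySem.List.slice sufs (some 1) none)).foldl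
    (fun (st : Option Int × Option Int) xs =>
      let pref := match st.1 with | none => xs.1 | some p => max p xs.1
      let d := |pref - xs.2|
      let best := match st.2 with | none => d | some b => if d > b then d else b
      (some pref, some best))
    (none, none)
  (st2.2).getD 0

-- ===== PRECONDITION & SPEC =====
-- A raises on lists of length < 2 (IndexError on an empty list, ValueError from max of an empty slice on singletons).
def Pre_solution (arr : List Int) : Prop := 2 ≤ arr.length
instance (arr : List Int) : Decidable (Pre_solution arr) := by unfold Pre_solution; infer_instance
def pvWitness_solution : List Int := [1, 5, 2]

def Spec_solution (arr : List Int) (out : Int) : Prop := out = solution_alt arr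
instance (arr : List Int) (out : Int) : Decidable (Spec_solution arr out) := by unfold Spec_solution; infer_instance

-- ===== CLAIM (what is proved, stated in full; the proofs are below) =====
def Claim_equal_solution : Prop := ∀ (arr : List Int), Dom_solution arr → Pre_solution arr → Spec_solution arr (solution arr)

-- ===== LEMMAS AND PROOFS =====

-- max of a nonempty list, as Python's running-max loop (0 for [], never used there)
def smax : List Int → Int
  | [] => 0
  | x :: t => t.foldl max x

-- |max(arr[:i]) - max(arr[i:])| at split i
def dsplit (arr : List Int) (i : Nat) : Int := |smax (arr.take i) - smax (arr.drop i)|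

-- best difference over splits 1..k+1
def bestAux (arr : List Int) : Nat → Int
  | 0 => dsplit arr 1
  | k + 1 => max (bestAux arr k) (dsplit arr (k + 2))

theorem foldl_max_comm (t : List Int) (a b : Int) :
    t.foldl max (max a b) = max a (t.foldl max b) := by
  induction t generalizing b with
  | nil => simp
  | cons y t ih => simp only [List.foldl_cons, max_assoc, ih]

theorem smax_cons (x : Int) (t : List Int) (h : t ≠ []) :
    smax (x :: t) = max x (smax t) := by
  cases t with
  | nil => simp at h
  | cons y t' => simp [smax, List.foldl_cons, foldl_max_comm]

theorem smax_snoc (l : List Int) (x : Int) (h : l ≠ []) :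
    smax (l ++ [x]) = max (smax l) x := by
  cases l with
  | nil => simp at h
  | cons y t => simp [smax, List.foldl_append]

theorem take_ne_nil (arr : List Int) (i : Nat) (h1 : 1 ≤ i) (h2 : 1 ≤ arr.length) :
    arr.take i ≠ [] := by
  intro hc
  have h3 : (arr.take i).length = 0 := by rw [hc]; rfl
  rw [List.length_take] at h3
  omega

theorem drop_ne_nil (arr : List Int) (i : Nat) (h : i < arr.length) :
    arr.drop i ≠ [] := by
  intro hc
  have := congrArg List.length hc
  simp at this
  omega

theorem smax_take_succ (arr : List Int) (i : Nat) (h1 : 1 ≤ i) (h2 : i < arr.length) :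
    smax (arr.take (i + 1)) = max (smax (arr.take i)) arr[i] := by
  have ht : arr.take (i + 1) = arr.take i ++ [arr[i]] := by
    rw [List.take_add_one]
    simp [List.getElem?_eq_getElem h2]
  rw [ht, smax_snoc _ _ (take_ne_nil arr i h1 (by omega))]

theorem smax_drop (arr : List Int) (i : Nat) (h : i + 1 < arr.length) :
    smax (arr.drop i) = max arr[i] (smax (arr.drop (i + 1))) := by
  rw [List.drop_eq_getElem_cons (by omega : i < arr.length),
      smax_cons _ _ (drop_ne_nil arr (i + 1) h)]

theorem max?_getD_smax (l : List Int) (h : l ≠ []) :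
    (PySem.List.max? l (fun y => y)).getD 0 = smax l := by
  cases l with
  | nil => simp at h
  | cons x t => rw [PySem.List.max?_id_cons]; rfl

theorem ite_gt_eq_max (d m : Int) : (if d > m then d else m) = max m d := by
  rw [max_def]
  split_ifs <;> omega

-- A's loop invariant: at loop entry i the state is
-- (max(arr[:i]), max(arr[i:]), best over splits 1..i)
theorem foldA (arr : List Int) (k : Nat) :
    ∀ (i : Nat), 1 ≤ i → i + k + 1 = arr.length →
    (PySem.List.pyRange (i : Int) ((arr.length : Int) - 1) 1).foldl
      (fun (st : Int × Int × Int) i =>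
        let ml := max st.1 ((PySem.List.pyGet? arr i).getD 0)
        let mr := if st.2.1 = (PySem.List.pyGet? arr i).getD 0
                  then (PySem.List.max? (PySem.List.slice arr (some (i + 1)) none) (fun y => y)).getD 0
                  else st.2.1
        let d := |ml - mr|
        (ml, mr, if d > st.2.2 then d else st.2.2))
      (smax (arr.take i), smax (arr.drop i), bestAux arr (i - 1))
    = (smax (arr.take (arr.length - 1)), smax (arr.drop (arr.length - 1)),
       bestAux arr (arr.length - 2)) := by
  induction k with
  | zero =>
    intro i h1 h2
    rw [PySem.List.pyRange_one_eq_nil (by omega)]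
    have e1 : i = arr.length - 1 := by omega
    have e2 : i - 1 = arr.length - 2 := by omega
    rw [List.foldl_nil, e2, e1]
  | succ k ih =>
    intro i h1 h2
    have hi : i < arr.length := by omega
    rw [PySem.List.pyRange_one_cons (by omega), List.foldl_cons]
    have hget : (PySem.List.pyGet? arr (i : Int)).getD 0 = arr[i] := by
      simp [List.getElem?_eq_getElem hi]
    have hslice : PySem.List.slice arr (some ((i : Int) + 1)) none = arr.drop (i + 1) := by
      rw [show ((i : Int) + 1) = (((i + 1 : Nat) : Int)) by push_cast; ring,
          PySem.List.slice_from_natCast]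
    simp only [hget, hslice]
    have hml : max (smax (arr.take i)) arr[i] = smax (arr.take (i + 1)) :=
      (smax_take_succ arr i h1 hi).symm
    have hd : smax (arr.drop i) = max arr[i] (smax (arr.drop (i + 1))) :=
      smax_drop arr i (by omega)
    have hmr : (if smax (arr.drop i) = arr[i]
        then (PySem.List.max? (arr.drop (i + 1)) (fun y => y)).getD 0
        else smax (arr.drop i)) = smax (arr.drop (i + 1)) := by
      rw [max?_getD_smax _ (drop_ne_nil arr (i + 1) (by omega))]
      split_ifs with hc
      · rfl
      · rw [hd]
        rcases max_choice arr[i] (smax (arr.drop (i + 1))) with h | h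
        · rw [hd, h] at hc; exact absurd rfl hc
        · exact h
    rw [hml, hmr]
    have hbest : (if |smax (arr.take (i + 1)) - smax (arr.drop (i + 1))| > bestAux arr (i - 1)
        then |smax (arr.take (i + 1)) - smax (arr.drop (i + 1))|
        else bestAux arr (i - 1)) = bestAux arr i := by
      rw [ite_gt_eq_max]
      have hi1 : i = (i - 1) + 1 := by omega
      rw [hi1]
      show max (bestAux arr (i - 1 + 1 - 1)) _ = _
      rw [show i - 1 + 1 - 1 = i - 1 from rfl, bestAux]
      rw [show i - 1 + 2 = i - 1 + 1 + 1 from rfl]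
      rfl
    rw [hbest,
        show ((i : Int) + 1) = (((i + 1 : Nat) : Int)) by push_cast; ring]
    have := ih (i + 1) (by omega) (by omega)
    rw [show i + 1 - 1 = i from rfl] at this
    exact this

-- B's suffix build: the reversed fold produces max(l++[z]) and, reversed,
-- the list of all suffix maxima of l ++ [z]
theorem buildSuf (l : List Int) (z : Int) :
    (l.reverse).foldl (fun (st : Int × List Int) x => (max x st.1, st.2 ++ [max x st.1])) (z, [z])
    = (smax (l ++ [z]),
       ((List.range (l.length + 1)).map (fun i => smax ((l ++ [z]).drop i))).reverse) := by
  induction l with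
  | nil => simp [smax]
  | cons c l' ih =>
    rw [List.reverse_cons, List.foldl_append, ih, List.foldl_cons, List.foldl_nil]
    have hsm : smax (c :: (l' ++ [z])) = max c (smax (l' ++ [z])) :=
      smax_cons c (l' ++ [z]) (by simp)
    have hlist : (List.range (l'.length + 1 + 1)).map (fun i => smax ((c :: (l' ++ [z])).drop i))
        = smax (c :: (l' ++ [z])) :: (List.range (l'.length + 1)).map (fun i => smax ((l' ++ [z]).drop i)) := by
      rw [List.range_succ_eq_map, List.map_cons, List.map_map]
      simp [Function.comp_def]
    simp only [List.cons_append, List.length_cons, hlist, List.reverse_cons, hsm]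

theorem zip_map_range (arr l2 : List Int) (g : Nat → Int) (k : Nat)
    (h1 : k ≤ arr.length) (h2 : l2 = (List.range k).map g) :
    arr.zip l2 = (List.range k).map (fun i => (arr.getD i 0, g i)) := by
  subst h2
  apply List.ext_getElem
  · simp; omega
  · intro i hi1 hi2
    simp only [List.length_zip, List.length_map, List.length_range] at hi1
    have hik : i < k := by omega
    have hia : i < arr.length := by omega
    simp [List.getElem_zip, List.getD_eq_getElem?_getD, List.getElem?_eq_getElem hia]

-- B's scan invariant: after k steps the state is
-- (max(arr[:k]), best over splits 1..k)
theorem foldB (arr : List Int) (k : Nat) (h1 : 1 ≤ k) (h2 : k + 1 ≤ arr.length) :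
    ((List.range k).map (fun i => (arr.getD i 0, smax (arr.drop (i + 1))))).foldl
      (fun (st : Option Int × Option Int) xs =>
        let pref := match st.1 with | none => xs.1 | some p => max p xs.1
        let d := |pref - xs.2|
        let best := match st.2 with | none => d | some b => if d > b then d else b
        (some pref, some best))
      (none, none)
    = (some (smax (arr.take k)), some (bestAux arr (k - 1))) := by
  induction k with
  | zero => omega
  | succ k ih =>
    cases Nat.eq_or_lt_of_le h1 with
    | inl h0 =>
      -- k + 1 = 1, first iteration from (none, none)
      cases arr with
      | nil => simp at h2
      | cons x t =>
        rw [← h0]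
        simp [smax, dsplit, bestAux, List.getD_eq_getElem?_getD]
    | inr h0 =>
      have hk1 : 1 ≤ k := by omega
      have hklen : k < arr.length := by omega
      rw [List.range_succ, List.map_append, List.foldl_append, ih hk1 (by omega),
          List.map_cons, List.map_nil, List.foldl_cons, List.foldl_nil]
      have hget : arr.getD k 0 = arr[k] := by
        simp [List.getD_eq_getElem?_getD, List.getElem?_eq_getElem hklen]
      simp only [hget]
      have hml : max (smax (arr.take k)) arr[k] = smax (arr.take (k + 1)) :=
        (smax_take_succ arr k hk1 hklen).symm
      rw [hml, ite_gt_eq_max]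
      have hbest : max (bestAux arr (k - 1)) |smax (arr.take (k + 1)) - smax (arr.drop (k + 1))|
          = bestAux arr k := by
        have hk : k = (k - 1) + 1 := by omega
        rw [hk]
        show max (bestAux arr (k - 1 + 1 - 1)) _ = _
        rw [show k - 1 + 1 - 1 = k - 1 from rfl, bestAux]
        rw [show k - 1 + 2 = k - 1 + 1 + 1 from rfl]
        rfl
      rw [show k + 1 - 1 = k from rfl, hbest]

theorem solution_eq (arr : List Int) (h : 2 ≤ arr.length) :
    solution arr = bestAux arr (arr.length - 2) := by
  match arr, h with
  | x :: y :: t, _ =>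
    simp only [solution]
    rw [PySem.List.slice_from_one]
    have h0 : (PySem.List.pyGet? (x :: y :: t) 0).getD 0 = smax ((x :: y :: t).take 1) := by
      simp [smax]
    have h1 : (PySem.List.max? ((x :: y :: t).tail) (fun y => y)).getD 0
        = smax ((x :: y :: t).drop 1) := by
      rw [max?_getD_smax _ (by simp)]; rfl
    rw [h0, h1]
    have h2 : |smax ((x :: y :: t).take 1) - smax ((x :: y :: t).drop 1)|
        = bestAux (x :: y :: t) (1 - 1) := by
      simp [bestAux, dsplit]
    rw [h2]
    have := foldA (x :: y :: t) ((x :: y :: t).length - 2) 1 (le_refl 1) (by simp; omega)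
    rw [show ((1 : Nat) : Int) = (1 : Int) from rfl] at this
    rw [this]

theorem solution_alt_eq (arr : List Int) (h : 2 ≤ arr.length) :
    solution_alt arr = bestAux arr (arr.length - 2) := by
  have hne : arr ≠ [] := by intro hc; subst hc; simp at h
  simp only [solution_alt]
  rw [PySem.List.slice_to_neg_one, PySem.List.pyGet?_neg_one,
      List.getLast?_eq_some_getLast hne, Option.getD_some]
  have hb := buildSuf arr.dropLast (arr.getLast hne)
  rw [List.dropLast_concat_getLast hne] at hb
  have hlen : arr.dropLast.length + 1 = arr.length := by
    rw [List.length_dropLast]; omega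
  rw [hlen] at hb
  simp only [hb, List.reverse_reverse]
  -- sufs = map (fun i => smax (arr.drop i)) (range arr.length); take its tail
  have hdrop1 : PySem.List.slice ((List.range arr.length).map (fun i => smax (arr.drop i))) (some 1) none
      = (List.range (arr.length - 1)).map (fun i => smax (arr.drop (i + 1))) := by
    rw [PySem.List.slice_from_one,
        show arr.length = (arr.length - 1) + 1 by omega,
        List.range_succ_eq_map, List.map_cons, List.tail_cons, List.map_map]
    rfl
  rw [hdrop1,
      zip_map_range arr _ (fun i => smax (arr.drop (i + 1))) (arr.length - 1) (by omega) rfl,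
      foldB arr (arr.length - 1) (by omega) (by omega)]
  rw [show arr.length - 1 - 1 = arr.length - 2 from by omega]
  rfl

-- ===== VERDICT (by name: the statement is the Claim_ definition above) =====
theorem solution_spec : Claim_equal_solution := by
  intro arr _ hpre
  unfold Spec_solution
  rw [solution_eq arr hpre, solution_alt_eq arr hpre]
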